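-- pv_equiv track=rewrite | github.com/tarunparthasarathy/leetcode-problems | 16_graph_traversal.py | cryptic_dictionary
-- ===== SOURCE A (Python) =====
-- class Graph:
--     def __init__(self):
--         self.storage = {}
--
--     def add_vertex(self, id):
--         if id not in self.storage:
--             self.storage[id] = []
--             return True
--         else:
--             return False
--
--     def remove_vertex(self, id):
--         if id not in self.storage:
--             return False
--
--         for vertex in self.storage:
--             edges = self.storage[vertex]
--             if id in edges:
--                 edges.remove(id)
--
--         del self.storage[id]
--         return True
--
--     def add_edge(self, id1, id2):
--         if id1 not in self.storage or id2 not in self.storage: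
--             return False
--         if id2 in self.storage[id1]:
--             return False
--         self.storage[id1].append(id2)
--         return True
--
--     def remove_edge(self, id1, id2):
--         if id1 in self.storage:
--             if id2 in self.storage[id1]:
--                 self.storage[id1].remove(id2)
--                 return True
--         return False
--
--     def is_vertex(self, id):
--         return id in self.storage
--
--     def neighbors(self, id):
--         if id in self.storage:
--             return self.storage[id]
--         return None
--
--     def vertices(self):
--         return [key for (key,value) in self.storage.items()]
--
-- def generate_adjacency_list(edges):
--     """
--     Helper method to generate an adjacency list from a list of edges.
--     """
--     graph = Graph()
--     for edge in edges:
--         start = edge[0]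
--         end = edge[1]
--         graph.add_vertex(start)
--         graph.add_vertex(end)
--         graph.add_edge(start, end)
--     return graph
--
-- def topological_sort(graph):
--     """
--     Helper method to perform topological sort on graph.
--     """
--     visited = set()
--     results = []
--
--     def dfs(current):
--         if current in visited:
--             return
--         visited.add(current)
--         neighbors = graph.neighbors(current)
--         for neighbor in neighbors:
--             dfs(neighbor)
--         results.append(current)
--
--     for node in graph.vertices():
--         dfs(node)
--
--     return list(reversed(results))
--
-- def cryptic_dictionary(words):
--     def first_letter_difference(word1, word2):
--         for letter in range(min(len(word1), len(word2))):
--             if word1[letter] != word2[letter]: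
--                 return [word1[letter], word2[letter]]
--
--     edges = []
--     for i in range(len(words) - 1):
--         word = words[i]
--         next_word = words[i + 1]
--         if first_letter_difference(word, next_word) is not None:
--             edges.append(first_letter_difference(word, next_word))
--     graph = generate_adjacency_list(edges)
--     return topological_sort(graph)
-- ===== SOURCE B (Python) =====
-- def cryptic_dictionary(words):
--     def first_diff(w1, w2):
--         for a, b in zip(w1, w2):
--             if a != b:
--                 return (a, b)
--         return None
--
--     # adjacency dict built directly from adjacent word pairs
--     graph = {}
--     for w1, w2 in zip(words, words[1:]):
--         d = first_diff(w1, w2)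
--         if d is not None:
--             a, b = d
--             graph.setdefault(a, [])
--             graph.setdefault(b, [])
--             if b not in graph[a]:
--                 graph[a].append(b)
--
--     # iterative DFS (explicit stack with post-visit markers), reverse post-order
--     visited = set()
--     order = []
--     for v in graph:
--         stack = [(False, v)]
--         while stack:
--             done, u = stack.pop()
--             if done:
--                 order.append(u)
--             elif u not in visited:
--                 visited.add(u)
--                 stack.append((True, u))
--                 for w in reversed(graph.get(u, [])):
--                     stack.append((False, w))
--     return order[::-1]
-- ===== Notes on version B (the rewrite author's own statement) =====
-- stated objective: alternative
-- what changed: Replaces the Graph class plus recursive nested-function DFS by a plain adjacency dict built from zipped adjacent word pairs and an iterative explicit-stack DFS with post-visit markers that reproduces the same reverse post-order.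
import Mathlib
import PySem

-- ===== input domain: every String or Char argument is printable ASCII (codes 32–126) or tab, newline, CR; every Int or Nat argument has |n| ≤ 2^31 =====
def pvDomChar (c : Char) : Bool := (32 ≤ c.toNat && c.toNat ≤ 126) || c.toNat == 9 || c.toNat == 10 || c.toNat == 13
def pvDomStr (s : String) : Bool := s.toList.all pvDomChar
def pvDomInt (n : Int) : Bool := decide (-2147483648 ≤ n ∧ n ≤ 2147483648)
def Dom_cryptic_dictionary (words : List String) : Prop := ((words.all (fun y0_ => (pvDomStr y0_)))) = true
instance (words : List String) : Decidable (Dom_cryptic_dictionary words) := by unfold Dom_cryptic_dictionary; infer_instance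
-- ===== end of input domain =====

-- B replaces A's Graph class + recursive nested DFS by a plain adjacency dict built from zipped
-- adjacent word pairs and an explicit-stack iterative DFS (objective: alternative structure, same cost).

-- ===== PORT A =====
-- Vertices are one-character Python strings; they are carried as Char and wrapped into String at the end.

-- first_letter_difference: loop over range(min(len,len)), early return at first mismatch.
def pvFLDLoopA (w1 w2 : List Char) : List Int → Option (Char × Char)
  | [] => none
  | i :: rest =>
    if PySem.List.pyGetD w1 i ' ' ≠ PySem.List.pyGetD w2 i ' ' then
      some (PySem.List.pyGetD w1 i ' ', PySem.List.pyGetD w2 i ' ')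
    else pvFLDLoopA w1 w2 rest

def pvFirstDiffA (w1 w2 : List Char) : Option (Char × Char) :=
  pvFLDLoopA w1 w2 (PySem.List.pyRange 0 (min (PySem.List.len w1) (PySem.List.len w2)) 1)

-- Graph.add_vertex (return value unused by A's driver code)
def pvAddVertexA (g : PySem.Dict Char (List Char)) (id : Char) : PySem.Dict Char (List Char) :=
  if g.contains id then g else g.insert id []

-- Graph.add_edge (return value unused)
def pvAddEdgeA (g : PySem.Dict Char (List Char)) (id1 id2 : Char) : PySem.Dict Char (List Char) :=
  if ¬ g.contains id1 ∨ ¬ g.contains id2 then g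
  else if (g.getD id1 []).contains id2 then g
  else g.modify id1 [] (· ++ [id2])

-- generate_adjacency_list
def pvGenAdjA (edges : List (Char × Char)) : PySem.Dict Char (List Char) :=
  edges.foldl (fun g e => pvAddEdgeA (pvAddVertexA (pvAddVertexA g e.1) e.2) e.1 e.2)
    (PySem.Dict.mk [])

-- dfs of topological_sort; fuel makes the visited-set recursion structural, the driver passes
-- |keys|+1 which is never exhausted (each nested level marks a fresh vertex).
-- get? = none is unreachable in A's runs (every dfs argument is a vertex; Python would raise there).
def pvDfsA : Nat → PySem.Dict Char (List Char) → (PySem.Set Char × List Char) → Char →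
    (PySem.Set Char × List Char)
  | 0, _, s, _ => s
  | fuel + 1, g, s, c =>
    if PySem.Set.contains s.1 c then s
    else
      match g.get? c with
      | none => (PySem.Set.add s.1 c, s.2 ++ [c])
      | some ns =>
        let t := ns.foldl (fun s' w => pvDfsA fuel g s' w) (PySem.Set.add s.1 c, s.2)
        (t.1, t.2 ++ [c])

-- topological_sort: for node in vertices: dfs(node); list(reversed(results))
def pvTopoSortA (g : PySem.Dict Char (List Char)) : List Char :=
  (g.keys.foldl (fun s node => pvDfsA (g.keys.length + 1) g s node) (PySem.Set.empty, [])).2.reverse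

def cryptic_dictionary (words : List String) : List String :=
  -- for i in range(len(words)-1): append first_letter_difference(words[i], words[i+1]) if not None
  let edges := (PySem.List.pyRange 0 (PySem.List.len words - 1) 1).foldl
    (fun es i =>
      let word := PySem.List.pyGetD words i ""
      let next_word := PySem.List.pyGetD words (i + 1) ""
      match pvFirstDiffA word.toList next_word.toList with  -- A computes the same call twice
      | some e => es ++ [e]
      | none => es) []
  (pvTopoSortA (pvGenAdjA edges)).map (fun c => String.ofList [c])

-- ===== PORT B =====

-- first_diff: first differing pair of zipped letters
def pvFirstDiffB : List (Char × Char) → Option (Char × Char)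
  | [] => none
  | (a, b) :: rest => if a ≠ b then some (a, b) else pvFirstDiffB rest

-- measure helpers for the while-loop (proof devices for termination only)
def pvUnvis (g : PySem.Dict Char (List Char)) (vis : PySem.Set Char) : Nat :=
  (g.keys.filter (fun c => !(PySem.Set.contains vis c))).length

def pvDegTotal (g : PySem.Dict Char (List Char)) : Nat := (g.values.map List.length).sum

def pvStackW (st : List (Bool × Char)) : Nat := (st.map (fun f => if f.1 then 1 else 2)).sum

theorem pvStackW_push (ns : List Char) (st : List (Bool × Char)) :
    pvStackW (ns.foldl (fun st w => ((false : Bool), w) :: st) st) = 2 * ns.length + pvStackW st := by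
  induction ns generalizing st with
  | nil => simp
  | cons n tl ih =>
    rw [List.foldl_cons, ih]
    simp [pvStackW]
    omega

theorem pvMem_add {vis : PySem.Set Char} {u c : Char} :
    c ∈ PySem.Set.add vis u ↔ (c ∈ vis ∨ c = u) := by
  unfold PySem.Set.add
  by_cases h : PySem.Set.contains vis u = true
  · simp only [PySem.Set.contains, List.contains_eq_mem, decide_eq_true_eq] at h
    simp [h]
    intro hc; subst hc; exact h
  · simp only [PySem.Set.contains, List.contains_eq_mem] at h
    simp at h
    simp [h]

theorem pvContains_eq (vis : PySem.Set Char) (c : Char) :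
    PySem.Set.contains vis c = decide (c ∈ vis) := by
  simp [PySem.Set.contains, List.contains_eq_mem]

theorem pvNotContains_add (vis : PySem.Set Char) (u : Char) :
    (fun c => !(PySem.Set.contains (PySem.Set.add vis u) c)) =
    (fun c => (!(c == u)) && (!(PySem.Set.contains vis c))) := by
  funext c
  by_cases h1 : c ∈ vis <;> by_cases h2 : c = u <;>
    simp [pvContains_eq, pvMem_add, h1, h2]

theorem pvUnvis_add_lt {g : PySem.Dict Char (List Char)} {vis : PySem.Set Char} {u : Char}
    (hk : u ∈ g.keys) (hv : PySem.Set.contains vis u = false) :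
    pvUnvis g (PySem.Set.add vis u) < pvUnvis g vis := by
  have hvm : u ∉ vis := by simpa [pvContains_eq] using hv
  unfold pvUnvis
  rw [pvNotContains_add, ← List.filter_filter]
  apply List.length_filter_lt_length_iff_exists.2
  exact ⟨u, List.mem_filter.2 ⟨hk, by simp [pvContains_eq, hvm]⟩, by simp⟩

theorem pvNot_mem_keys {g : PySem.Dict Char (List Char)} {u : Char}
    (hk : g.contains u = false) : u ∉ g.keys := by
  intro hm
  simp only [PySem.Dict.keys] at hm
  obtain ⟨p, hp, he⟩ := List.mem_map.1 hm
  have : g.contains u = true := by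
    simp only [PySem.Dict.contains, List.any_eq_true]
    exact ⟨p, hp, by simp [he]⟩
  rw [this] at hk; cases hk

theorem pvUnvis_add_not_key {g : PySem.Dict Char (List Char)} {vis : PySem.Set Char} {u : Char}
    (hk : g.contains u = false) : pvUnvis g (PySem.Set.add vis u) = pvUnvis g vis := by
  have hmem : u ∉ g.keys := pvNot_mem_keys hk
  unfold pvUnvis
  congr 1
  apply List.filter_congr
  intro c hc
  have hne : c ≠ u := fun h => hmem (h ▸ hc)
  by_cases h1 : c ∈ vis <;> simp [pvContains_eq, pvMem_add, h1, hne]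

theorem pvContains_mem_keys {g : PySem.Dict Char (List Char)} {u : Char}
    (h : g.contains u = true) : u ∈ g.keys := by
  simp only [PySem.Dict.contains, List.any_eq_true] at h
  obtain ⟨p, hp, he⟩ := h
  have he' : p.1 = u := by simpa using he
  show u ∈ g.items.map (·.1)
  exact he' ▸ List.mem_map_of_mem hp

theorem pvGet?_of_contains {g : PySem.Dict Char (List Char)} {u : Char}
    (h : g.contains u = true) : ∃ ns, g.get? u = some ns := by
  simp only [PySem.Dict.contains, List.any_eq_true] at h
  obtain ⟨p, hp, he⟩ := h
  rcases hfind : List.find? (fun p => p.1 == u) g.items with _ | q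
  · rw [List.find?_eq_none] at hfind
    exact absurd he (by simpa using hfind p hp)
  · exact ⟨q.2, by simp [PySem.Dict.get?, hfind]⟩

theorem pvDeg_le {g : PySem.Dict Char (List Char)} {u : Char} {ns : List Char}
    (h : g.get? u = some ns) : ns.length ≤ pvDegTotal g := by
  have hmem : ns ∈ g.values := by
    simp only [PySem.Dict.get?, Option.map_eq_some_iff] at h
    obtain ⟨p, hp, he⟩ := h
    have hpm := List.mem_of_find?_eq_some hp
    show ns ∈ g.items.map (·.2)
    exact he ▸ List.mem_map_of_mem hpm
  unfold pvDegTotal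
  exact List.le_sum_of_mem (List.mem_map_of_mem hmem)

-- termination facts for the while-loop, named so the loop's decreasing proofs stay one-liners
theorem pvDec1 (g : PySem.Dict Char (List Char)) (s : PySem.Set Char × List Char) (u : Char)
    (rest : List (Bool × Char)) :
    (2 * pvDegTotal g + 2) * pvUnvis g s.1 + pvStackW rest <
      (2 * pvDegTotal g + 2) * pvUnvis g s.1 + pvStackW ((true, u) :: rest) := by
  simp [pvStackW]

theorem pvDec2 (g : PySem.Dict Char (List Char)) (s : PySem.Set Char × List Char) (u : Char)
    (rest : List (Bool × Char)) :
    (2 * pvDegTotal g + 2) * pvUnvis g s.1 + pvStackW rest <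
      (2 * pvDegTotal g + 2) * pvUnvis g s.1 + pvStackW ((false, u) :: rest) := by
  simp [pvStackW]

theorem pvDec3 (g : PySem.Dict Char (List Char)) (vis : PySem.Set Char) (u : Char)
    (rest : List (Bool × Char)) (hvis : PySem.Set.contains vis u = false) :
    (2 * pvDegTotal g + 2) * pvUnvis g (PySem.Set.add vis u) +
        pvStackW ((g.getD u []).reverse.foldl (fun st w => ((false : Bool), w) :: st)
          ((true, u) :: rest)) <
      (2 * pvDegTotal g + 2) * pvUnvis g vis + pvStackW ((false, u) :: rest) := by
  simp only [pvStackW_push, List.length_reverse]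
  by_cases hc : g.contains u
  · obtain ⟨ns, hns⟩ := pvGet?_of_contains hc
    have hdeg : (g.getD u []).length ≤ pvDegTotal g := by
      have hgd : g.getD u [] = ns := by simp [PySem.Dict.getD, hns]
      rw [hgd]; exact pvDeg_le hns
    have hlt : pvUnvis g (PySem.Set.add vis u) < pvUnvis g vis :=
      pvUnvis_add_lt (pvContains_mem_keys hc) hvis
    have hw : pvStackW ((true, u) :: rest) = 1 + pvStackW rest := by simp [pvStackW]
    have hw2 : pvStackW ((false, u) :: rest) = 2 + pvStackW rest := by simp [pvStackW]
    rw [hw, hw2]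
    set C := 2 * pvDegTotal g + 2 with hC
    set u' := pvUnvis g (PySem.Set.add vis u)
    set uv := pvUnvis g vis
    have h1 : C * u' + C ≤ C * uv := by
      have h2 : C * u' + C = C * (u' + 1) := by ring
      rw [h2]
      exact Nat.mul_le_mul_left C (by omega)
    calc C * u' + (2 * (g.getD u []).length + (1 + pvStackW rest))
        < C * u' + (C + (2 + pvStackW rest)) := by
          apply Nat.add_lt_add_left
          omega
      _ = (C * u' + C) + (2 + pvStackW rest) := by ring
      _ ≤ C * uv + (2 + pvStackW rest) := Nat.add_le_add_right h1 _
  · have h0 : g.getD u [] = [] :=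
      PySem.Dict.getD_of_not_contains g [] (by simpa using hc)
    have he : pvUnvis g (PySem.Set.add vis u) = pvUnvis g vis :=
      pvUnvis_add_not_key (by simpa using hc)
    simp [h0, he, pvStackW]

-- the iterative DFS while-loop of B; terminates because each step either shrinks the stack
-- weight or marks a fresh vertex visited
def pvLoopB (g : PySem.Dict Char (List Char)) :
    (PySem.Set Char × List Char) → List (Bool × Char) → (PySem.Set Char × List Char)
  | s, [] => s
  | s, (true, u) :: rest => pvLoopB g (s.1, s.2 ++ [u]) rest
  | s, (false, u) :: rest =>
    if PySem.Set.contains s.1 u then pvLoopB g s rest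
    else pvLoopB g (PySem.Set.add s.1 u, s.2)
      ((g.getD u []).reverse.foldl (fun st w => ((false : Bool), w) :: st) ((true, u) :: rest))
termination_by s st => (2 * pvDegTotal g + 2) * pvUnvis g s.1 + pvStackW st
decreasing_by
  · exact pvDec1 g s u rest
  · exact pvDec2 g s u rest
  · rename_i hvis
    exact pvDec3 g s.1 u rest (by simpa using hvis)

def cryptic_dictionary_alt (words : List String) : List String :=
  -- adjacency dict from zipped adjacent pairs (words[1:] is the tail slice)
  let g := (words.zip (PySem.List.slice words (some 1) none)).foldl
    (fun g p =>
      match pvFirstDiffB (p.1.toList.zip p.2.toList) with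
      | none => g
      | some (a, b) =>
        let g1 := g.setdefault a []
        let g2 := g1.setdefault b []
        if (g2.getD a []).contains b then g2 else g2.modify a [] (· ++ [b]))
    (PySem.Dict.mk [])
  -- iterative DFS from each key, reverse post-order; order[::-1] is the reversal
  let s := g.keys.foldl (fun s v => pvLoopB g s [(false, v)]) (PySem.Set.empty, [])
  s.2.reverse.map (fun c => String.ofList [c])

-- ===== PRECONDITION & SPEC =====
def Spec_cryptic_dictionary (words : List String) (out : List String) : Prop := out = cryptic_dictionary_alt words
instance (words : List String) (out : List String) : Decidable (Spec_cryptic_dictionary words out) := by unfold Spec_cryptic_dictionary; infer_instance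

-- ===== CLAIM (what is proved, stated in full; the proofs are below) =====
def Claim_equal_cryptic_dictionary : Prop := ∀ (words : List String), Dom_cryptic_dictionary words → Spec_cryptic_dictionary words (cryptic_dictionary words)

-- ===== LEMMAS AND PROOFS =====

-- ---- step equations for the while-loop ----
theorem pvLoopB_nil (g : PySem.Dict Char (List Char)) (s : PySem.Set Char × List Char) :
    pvLoopB g s [] = s := by rw [pvLoopB]

theorem pvLoopB_true (g : PySem.Dict Char (List Char)) (s : PySem.Set Char × List Char)
    (u : Char) (rest : List (Bool × Char)) :
    pvLoopB g s ((true, u) :: rest) = pvLoopB g (s.1, s.2 ++ [u]) rest := by rw [pvLoopB]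

theorem pvLoopB_false (g : PySem.Dict Char (List Char)) (s : PySem.Set Char × List Char)
    (u : Char) (rest : List (Bool × Char)) :
    pvLoopB g s ((false, u) :: rest) =
      if PySem.Set.contains s.1 u then pvLoopB g s rest
      else pvLoopB g (PySem.Set.add s.1 u, s.2)
        ((g.getD u []).reverse.foldl (fun st w => ((false : Bool), w) :: st) ((true, u) :: rest)) := by
  rw [pvLoopB]

theorem pvPushShape (ns : List Char) (st : List (Bool × Char)) :
    ns.reverse.foldl (fun st w => ((false : Bool), w) :: st) st =
      ns.map (fun w => ((false : Bool), w)) ++ st := by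
  rw [List.foldl_reverse]
  induction ns with
  | nil => simp
  | cons n tl ih => simp [ih]

-- ---- the visited set only grows under A's dfs ----
theorem pvDfsA_mono (fuel : Nat) :
    ∀ (g : PySem.Dict Char (List Char)) (s : PySem.Set Char × List Char) (c x : Char),
      x ∈ s.1 → x ∈ (pvDfsA fuel g s c).1 := by
  induction fuel with
  | zero => intro g s c x hx; simpa [pvDfsA] using hx
  | succ f ih =>
    intro g s c x hx
    simp only [pvDfsA]
    by_cases hvis : c ∈ s.1
    · rw [if_pos (by simp [pvContains_eq, hvis])]; exact hx
    · rw [if_neg (by simp [pvContains_eq, hvis])]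
      have hadd : x ∈ PySem.Set.add s.1 c := pvMem_add.2 (Or.inl hx)
      cases hg : g.get? c with
      | none => simp only [hg]; exact hadd
      | some ns =>
        simp only [hg]
        have hfold : ∀ (l : List Char) (s' : PySem.Set Char × List Char), x ∈ s'.1 →
            x ∈ (l.foldl (fun s'' w => pvDfsA f g s'' w) s').1 := by
          intro l
          induction l with
          | nil => intro s' h; simpa using h
          | cons w tl ihl => intro s' h; exact ihl _ (ih g s' w x h)
        exact hfold ns (PySem.Set.add s.1 c, s.2) hadd

theorem pvUnvis_le_of_sub (g : PySem.Dict Char (List Char)) {v v' : PySem.Set Char}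
    (h : ∀ x, x ∈ v → x ∈ v') : pvUnvis g v' ≤ pvUnvis g v := by
  unfold pvUnvis
  apply List.Sublist.length_le
  apply List.monotone_filter_right
  intro a ha
  simp only [pvContains_eq, Bool.not_eq_true', decide_eq_false_iff_not] at ha ⊢
  exact fun hm => ha (h a hm)

theorem pvMem_keys_of_get? {g : PySem.Dict Char (List Char)} {u : Char} {ns : List Char}
    (h : g.get? u = some ns) : u ∈ g.keys := by
  simp only [PySem.Dict.get?, Option.map_eq_some_iff] at h
  obtain ⟨p, hp, _⟩ := h
  have hpred := List.find?_some hp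
  have : p.1 = u := by simpa using hpred
  show u ∈ g.items.map (·.1)
  exact this ▸ List.mem_map_of_mem (List.mem_of_find?_eq_some hp)

theorem pvUnvis_pos {g : PySem.Dict Char (List Char)} {vis : PySem.Set Char} {u : Char}
    (hk : u ∈ g.keys) (hv : PySem.Set.contains vis u = false) : 1 ≤ pvUnvis g vis := by
  unfold pvUnvis
  have hm : u ∉ vis := by simpa [pvContains_eq] using hv
  have : u ∈ g.keys.filter (fun c => !(PySem.Set.contains vis c)) :=
    List.mem_filter.2 ⟨hk, by simp [pvContains_eq, hm]⟩
  exact List.length_pos_of_mem this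

-- ---- the stack machine simulates A's recursive dfs ----
theorem pvS (k : Nat) :
    ∀ (g : PySem.Dict Char (List Char)) (fuel : Nat) (vis : PySem.Set Char) (ord : List Char)
      (u : Char) (rest : List (Bool × Char)),
      pvUnvis g vis ≤ k → k + 1 ≤ fuel →
      pvLoopB g (vis, ord) ((false, u) :: rest) =
        pvLoopB g (pvDfsA fuel g (vis, ord) u) rest := by
  induction k using Nat.strong_induction_on with
  | _ k IH =>
  intro g fuel vis ord u rest hk hf
  obtain ⟨f, rfl⟩ : ∃ f, fuel = f + 1 := ⟨fuel - 1, by omega⟩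
  rw [pvLoopB_false]
  by_cases hvis : u ∈ vis
  · simp [pvDfsA, pvContains_eq, hvis]
  · have hvf : PySem.Set.contains vis u = false := by simp [pvContains_eq, hvis]
    rw [if_neg (by simp [pvContains_eq, hvis])]
    cases hg : g.get? u with
    | none =>
      have h0 : g.getD u [] = [] := by simp [PySem.Dict.getD, hg]
      rw [h0]
      simp only [List.reverse_nil, List.foldl_nil]
      rw [pvLoopB_true]
      simp [pvDfsA, pvContains_eq, hvis, hg]
    | some ns =>
      have hgd : g.getD u [] = ns := by simp [PySem.Dict.getD, hg]
      rw [hgd, pvPushShape]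
      have hkeys : u ∈ g.keys := pvMem_keys_of_get? hg
      have hk1 : 1 ≤ k := le_trans (pvUnvis_pos hkeys hvf) hk
      have hsub : pvUnvis g (PySem.Set.add vis u) ≤ k - 1 := by
        have := pvUnvis_add_lt hkeys hvf
        omega
      have hL : ∀ (ws : List Char) (vis' : PySem.Set Char) (ord' : List Char)
          (rest' : List (Bool × Char)), pvUnvis g vis' ≤ k - 1 →
          pvLoopB g (vis', ord') (ws.map (fun w => ((false : Bool), w)) ++ rest') =
            pvLoopB g (ws.foldl (fun s' w => pvDfsA f g s' w) (vis', ord')) rest' := by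
        intro ws
        induction ws with
        | nil => intro vis' ord' rest' _; simp
        | cons w tl ihw =>
          intro vis' ord' rest' hv'
          simp only [List.map_cons, List.cons_append, List.foldl_cons]
          rw [IH (k - 1) (by omega) g f vis' ord' w _ hv' (by omega)]
          rcases hp : pvDfsA f g (vis', ord') w with ⟨v2, o2⟩
          have hv2 : pvUnvis g v2 ≤ k - 1 := by
            refine le_trans (pvUnvis_le_of_sub g ?_) hv'
            intro x hx
            have := pvDfsA_mono f g (vis', ord') w x hx
            rw [hp] at this; exact this
          exact ihw v2 o2 rest' hv2
      rw [hL ns (PySem.Set.add vis u) ord ((true, u) :: rest) hsub]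
      rw [pvLoopB_true]
      simp [pvDfsA, pvContains_eq, hvis, hg]

-- ---- both drivers compute the same final state ----
theorem pvDriveEq (g : PySem.Dict Char (List Char)) :
    ∀ (nodes : List Char) (s : PySem.Set Char × List Char),
      nodes.foldl (fun s v => pvLoopB g s [(false, v)]) s =
        nodes.foldl (fun s node => pvDfsA (g.keys.length + 1) g s node) s := by
  intro nodes
  induction nodes with
  | nil => intro s; rfl
  | cons v tl ih =>
    intro s
    simp only [List.foldl_cons]
    obtain ⟨vis, ord⟩ := s
    rw [show pvLoopB g (vis, ord) [(false, v)] =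
          pvLoopB g (pvDfsA (g.keys.length + 1) g (vis, ord) v) [] from
        pvS g.keys.length g (g.keys.length + 1) vis ord v []
          (List.length_filter_le _ _) (by omega),
      pvLoopB_nil, ih]

-- ---- first_letter_difference (index loop) equals the zipped first-difference ----
theorem pvFLDLoopA_shift (a b : Char) (t1 t2 : List Char) (idxs : List Nat) :
    pvFLDLoopA (a :: t1) (b :: t2) (idxs.map (fun k => ((k + 1 : Nat) : Int))) =
      pvFLDLoopA t1 t2 (idxs.map (Nat.cast : Nat → Int)) := by
  induction idxs with
  | nil => rfl
  | cons i tl ih =>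
    simp only [List.map_cons, pvFLDLoopA]
    have e1 : PySem.List.pyGetD (a :: t1) ((i + 1 : Nat) : Int) ' ' =
        PySem.List.pyGetD t1 (i : Int) ' ' := by
      rw [PySem.List.pyGetD_natCast, PySem.List.pyGetD_natCast, List.getD_cons_succ]
    have e2 : PySem.List.pyGetD (b :: t2) ((i + 1 : Nat) : Int) ' ' =
        PySem.List.pyGetD t2 (i : Int) ' ' := by
      rw [PySem.List.pyGetD_natCast, PySem.List.pyGetD_natCast, List.getD_cons_succ]
    rw [e1, e2, ih]

theorem pvFLD_zip : ∀ (w1 w2 : List Char), pvFirstDiffA w1 w2 = pvFirstDiffB (w1.zip w2) := by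
  intro w1
  induction w1 with
  | nil =>
    intro w2
    unfold pvFirstDiffA
    rw [PySem.List.pyRange_one_eq_nil
      (by simp only [PySem.List.len_eq, List.length_nil, Nat.cast_zero]; omega)]
    rfl
  | cons a t1 ih =>
    intro w2
    cases w2 with
    | nil =>
      unfold pvFirstDiffA
      rw [PySem.List.pyRange_one_eq_nil
        (by simp only [PySem.List.len_eq, List.length_nil, Nat.cast_zero]; omega)]
      rfl
    | cons b t2 =>
      unfold pvFirstDiffA
      have hmin : min (PySem.List.len (a :: t1)) (PySem.List.len (b :: t2)) =
          ((min t1.length t2.length + 1 : Nat) : Int) := by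
        simp only [PySem.List.len_eq, List.length_cons]
        push_cast
        omega
      rw [hmin, PySem.List.pyRange_zero_nat, List.range_succ_eq_map, List.map_cons, List.map_map]
      have hcomp : ((Nat.cast : Nat → Int) ∘ Nat.succ) = fun k : Nat => ((k + 1 : Nat) : Int) :=
        rfl
      rw [hcomp]
      simp only [pvFLDLoopA, Nat.cast_zero, PySem.List.pyGetD_zero_cons]
      by_cases hab : a = b
      · subst hab
        rw [if_neg (by simp)]
        rw [pvFLDLoopA_shift]
        have hmin2 : min (PySem.List.len t1) (PySem.List.len t2) =
            ((min t1.length t2.length : Nat) : Int) := by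
          simp only [PySem.List.len_eq]
          push_cast
          omega
        have hih := ih t2
        unfold pvFirstDiffA at hih
        rw [hmin2, PySem.List.pyRange_zero_nat] at hih
        rw [hih]
        simp [pvFirstDiffB]
      · rw [if_pos (by simpa using hab)]
        simp [pvFirstDiffB, hab]

-- ---- the index loop over adjacent words is the zip with the tail ----
theorem pvPairsAt (l : List String) :
    (List.range (l.length - 1)).map (fun i => (l.getD i "", l.getD (i + 1) "")) = l.zip l.tail := by
  induction l with
  | nil => simp
  | cons x t ih =>
    cases t with
    | nil => simp
    | cons y t2 =>
      have hlen : (x :: y :: t2).length - 1 = ((y :: t2).length - 1) + 1 := by simp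
      rw [hlen, List.range_succ_eq_map, List.map_cons, List.map_map]
      have hcomp : ((fun i : Nat => ((x :: y :: t2).getD i "", (x :: y :: t2).getD (i + 1) "")) ∘ Nat.succ)
          = fun i : Nat => ((y :: t2).getD i "", (y :: t2).getD (i + 1) "") := by
        funext i; simp [Nat.succ_eq_add_one, List.getD_cons_succ]
      rw [hcomp, ih]
      simp

-- ---- fold bridges: early-append fold is filterMap, option-match fold over pairs ----
theorem pvFoldAppendOpt {α β : Type} (f : α → Option β) (l : List α) :
    ∀ acc : List β,
      l.foldl (fun es x => es ++ (f x).toList) acc = acc ++ l.filterMap f := by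
  induction l with
  | nil => intro acc; simp
  | cons x tl ih =>
    intro acc
    cases hfx : f x <;> simp [List.foldl_cons, hfx, ih, List.filterMap_cons]

-- ---- per-edge graph update: A's class methods equal B's setdefault/modify sequence ----
theorem pvAddVertexA_eq (d : PySem.Dict Char (List Char)) (c : Char) :
    pvAddVertexA d c = d.setdefault c [] := by
  by_cases h : d.contains c
  · simp [pvAddVertexA, h, PySem.Dict.setdefault_of_contains d _ h]
  · have h' : d.contains c = false := by simpa using h
    simp [pvAddVertexA, h, PySem.Dict.setdefault_of_not_contains d _ h']

theorem pvUpd_eq (g : PySem.Dict Char (List Char)) (a b : Char) :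
    pvAddEdgeA (pvAddVertexA (pvAddVertexA g a) b) a b =
      (if (((g.setdefault a []).setdefault b []).getD a []).contains b
       then (g.setdefault a []).setdefault b []
       else ((g.setdefault a []).setdefault b []).modify a [] (· ++ [b])) := by
  rw [pvAddVertexA_eq, pvAddVertexA_eq]
  have hca : ((g.setdefault a []).setdefault b []).contains a = true := by
    rw [PySem.Dict.contains_setdefault, PySem.Dict.contains_setdefault]
    simp
  have hcb : ((g.setdefault a []).setdefault b []).contains b = true := by
    rw [PySem.Dict.contains_setdefault]
    simp
  unfold pvAddEdgeA
  rw [if_neg (by simp [hca, hcb])]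

-- A's index-driven edge collection equals filterMap over the zipped pairs
theorem pvEdgesA_eq (words : List String) :
    (PySem.List.pyRange 0 (PySem.List.len words - 1) 1).foldl
      (fun es i =>
        match pvFirstDiffA (PySem.List.pyGetD words i "").toList
            (PySem.List.pyGetD words (i + 1) "").toList with
        | some e => es ++ [e]
        | none => es) ([] : List (Char × Char))
    = (words.zip words.tail).filterMap (fun p => pvFirstDiffA p.1.toList p.2.toList) := by
  cases words with
  | nil =>
    rw [PySem.List.pyRange_one_eq_nil
      (by simp only [PySem.List.len_eq, List.length_nil, Nat.cast_zero]; omega)]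
    rfl
  | cons w ws =>
    have hl : PySem.List.len (w :: ws) - 1 = ((ws.length : Nat) : Int) := by
      simp only [PySem.List.len_eq, List.length_cons]
      push_cast
      ring
    rw [hl, PySem.List.pyRange_zero_nat, List.foldl_map]
    have hfun : (fun (x : List (Char × Char)) (y : Nat) =>
          (fun es i =>
            match pvFirstDiffA (PySem.List.pyGetD (w :: ws) i "").toList
                (PySem.List.pyGetD (w :: ws) (i + 1) "").toList with
            | some e => es ++ [e]
            | none => es) x ((fun k : Nat => (k : Int)) y))
        = (fun (x : List (Char × Char)) (y : Nat) =>
            x ++ (pvFirstDiffA ((w :: ws).getD y "").toList ((w :: ws).getD (y + 1) "").toList).toList) := by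
      funext x y
      have e1 : PySem.List.pyGetD (w :: ws) ((y : Nat) : Int) "" = (w :: ws).getD y "" :=
        PySem.List.pyGetD_natCast _ _ _
      have e2 : PySem.List.pyGetD (w :: ws) (((y : Nat) : Int) + 1) "" = (w :: ws).getD (y + 1) "" := by
        rw [show (((y : Nat) : Int) + 1) = ((y + 1 : Nat) : Int) by push_cast; ring]
        exact PySem.List.pyGetD_natCast _ _ _
      simp only [e1, e2]
      cases hfd : pvFirstDiffA ((w :: ws).getD y "").toList ((w :: ws).getD (y + 1) "").toList <;>
        simp [hfd]
    rw [hfun]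
    calc (List.range ws.length).foldl
          (fun (x : List (Char × Char)) (y : Nat) =>
            x ++ (pvFirstDiffA ((w :: ws).getD y "").toList ((w :: ws).getD (y + 1) "").toList).toList) []
        = [] ++ (List.range ws.length).filterMap
            (fun y => pvFirstDiffA ((w :: ws).getD y "").toList ((w :: ws).getD (y + 1) "").toList) :=
          pvFoldAppendOpt
            (fun y : Nat =>
              pvFirstDiffA ((w :: ws).getD y "").toList ((w :: ws).getD (y + 1) "").toList)
            (List.range ws.length) []
      _ = ((List.range ws.length).map
            (fun i => ((w :: ws).getD i "", (w :: ws).getD (i + 1) ""))).filterMap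
            (fun p => pvFirstDiffA p.1.toList p.2.toList) := by
          rw [List.filterMap_map]
          rfl
      _ = ((w :: ws).zip (w :: ws).tail).filterMap (fun p => pvFirstDiffA p.1.toList p.2.toList) := by
          rw [show ws.length = (w :: ws).length - 1 by simp, pvPairsAt]

-- B's dict-building fold over pairs equals the same filterMap folded with the per-edge update
theorem pvGB_eq (l : List (String × String)) :
    ∀ init : PySem.Dict Char (List Char),
      l.foldl
        (fun g p =>
          match pvFirstDiffB (p.1.toList.zip p.2.toList) with
          | none => g
          | some (a, b) =>
            if (((g.setdefault a []).setdefault b []).getD a []).contains b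
            then (g.setdefault a []).setdefault b []
            else ((g.setdefault a []).setdefault b []).modify a [] (· ++ [b])) init
      = (l.filterMap (fun p => pvFirstDiffB (p.1.toList.zip p.2.toList))).foldl
          (fun g e =>
            if (((g.setdefault e.1 []).setdefault e.2 []).getD e.1 []).contains e.2
            then (g.setdefault e.1 []).setdefault e.2 []
            else ((g.setdefault e.1 []).setdefault e.2 []).modify e.1 [] (· ++ [e.2])) init := by
  induction l with
  | nil => intro init; rfl
  | cons p tl ih =>
    intro init
    rcases hfd : pvFirstDiffB (p.1.toList.zip p.2.toList) with _ | ⟨a, b⟩ <;>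
      simp only [List.foldl_cons, List.filterMap_cons, hfd] <;>
      rw [ih]

-- the two graphs are one and the same dict
theorem pvGraphs_eq (words : List String) :
    pvGenAdjA ((PySem.List.pyRange 0 (PySem.List.len words - 1) 1).foldl
      (fun es i =>
        match pvFirstDiffA (PySem.List.pyGetD words i "").toList
            (PySem.List.pyGetD words (i + 1) "").toList with
        | some e => es ++ [e]
        | none => es) [])
    = (words.zip (PySem.List.slice words (some 1) none)).foldl
        (fun g p =>
          match pvFirstDiffB (p.1.toList.zip p.2.toList) with
          | none => g
          | some (a, b) =>
            if (((g.setdefault a []).setdefault b []).getD a []).contains b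
            then (g.setdefault a []).setdefault b []
            else ((g.setdefault a []).setdefault b []).modify a [] (· ++ [b]))
        (PySem.Dict.mk []) := by
  rw [PySem.List.slice_from_one, pvEdgesA_eq, pvGB_eq]
  have hFB : (fun p : String × String => pvFirstDiffB (p.1.toList.zip p.2.toList))
      = fun p : String × String => pvFirstDiffA p.1.toList p.2.toList :=
    funext fun p => (pvFLD_zip _ _).symm
  rw [hFB]
  unfold pvGenAdjA
  have hupd : (fun (g : PySem.Dict Char (List Char)) (e : Char × Char) =>
        pvAddEdgeA (pvAddVertexA (pvAddVertexA g e.1) e.2) e.1 e.2)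
      = fun (g : PySem.Dict Char (List Char)) (e : Char × Char) =>
          if (((g.setdefault e.1 []).setdefault e.2 []).getD e.1 []).contains e.2
          then (g.setdefault e.1 []).setdefault e.2 []
          else ((g.setdefault e.1 []).setdefault e.2 []).modify e.1 [] (· ++ [e.2]) :=
    funext fun g => funext fun e => pvUpd_eq g e.1 e.2
  rw [hupd]

theorem pv_main (words : List String) : cryptic_dictionary words = cryptic_dictionary_alt words := by
  simp only [cryptic_dictionary, cryptic_dictionary_alt, pvTopoSortA]
  rw [← pvGraphs_eq words, pvDriveEq]

-- ===== VERDICT (by name: the statement is the Claim_ definition above) =====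
theorem cryptic_dictionary_spec : Claim_equal_cryptic_dictionary := by
  intro words _
  unfold Spec_cryptic_dictionary
  exact pv_main words
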